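-- pv_equiv track=rewrite | github.com/AntonyXXu/Learning | Python practice/LeetCode/box_stacking.py | stackable
-- ===== SOURCE A (Python) =====
-- def stackable(boxes):
--     if len(boxes) <= 1:
--         return True
--
--     boxes.sort(key= lambda x: [max(x[0], x[1]), min(x[0], x[1])])
--
--     length = max(boxes[0][0], boxes[0][1])
--     width = min(boxes[0][0], boxes[0][1])
--
--     for box_index in range(1, len(boxes)):
--         nextLength = max(boxes[box_index][0], boxes[box_index][1])
--         nextWidth = min(boxes[box_index][0], boxes[box_index][1])
--         if length > nextLength or width > nextWidth:
--             return False
--         length = nextLength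
--         width = nextWidth
--     return True
-- ===== SOURCE B (Python) =====
-- def stackable(boxes):
--     # A sorts `boxes` in place; B leaves `boxes` unmodified (equivalence is about the
--     # return value only).  B needs no sort: the boxes nest in some order iff every two
--     # boxes are comparable componentwise after orienting each as (major, minor).
--     if len(boxes) <= 1:
--         return True
--     dims = [(max(b[0], b[1]), min(b[0], b[1])) for b in boxes]
--     for i in range(len(dims)):
--         li, wi = dims[i]
--         for j in range(i + 1, len(dims)):
--             lj, wj = dims[j]
--             if not ((li <= lj and wi <= wj) or (lj <= li and wj <= wi)):
--                 return False
--     return True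
-- ===== Notes on version B (the rewrite author's own statement) =====
-- stated objective: alternative
-- what changed: B drops A's sort entirely and decides stackability by checking that every pair of boxes, oriented as (major,minor), is comparable componentwise (boxes nest in some order iff the oriented pairs form a chain); B also does not mutate the input list, while A sorts it in place.
import Mathlib
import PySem

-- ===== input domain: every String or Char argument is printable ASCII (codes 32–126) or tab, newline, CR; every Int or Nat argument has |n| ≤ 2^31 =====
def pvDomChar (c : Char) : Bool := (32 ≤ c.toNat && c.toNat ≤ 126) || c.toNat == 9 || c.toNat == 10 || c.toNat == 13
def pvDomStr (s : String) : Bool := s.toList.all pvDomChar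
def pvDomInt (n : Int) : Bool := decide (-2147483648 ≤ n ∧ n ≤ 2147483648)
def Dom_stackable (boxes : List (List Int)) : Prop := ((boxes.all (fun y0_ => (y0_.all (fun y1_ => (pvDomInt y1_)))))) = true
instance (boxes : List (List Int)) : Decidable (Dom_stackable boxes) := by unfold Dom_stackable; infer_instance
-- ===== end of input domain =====

-- B drops A's sort and decides stackability by pairwise componentwise comparability of the
-- oriented (major, minor) dimensions; A sorts `boxes` in place while B does not mutate it,
-- and the equivalence proved here is about the return value only.


-- ===== PORT A =====
-- the sort key used by Python A: max(x[0], x[1]) and min(x[0], x[1])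
def maxDim (b : List Int) : Int := max (PySem.List.pyGetD b 0 0) (PySem.List.pyGetD b 1 0)
def minDim (b : List Int) : Int := min (PySem.List.pyGetD b 0 0) (PySem.List.pyGetD b 1 0)

-- A's `for box_index in range(1, len(boxes))` loop with early `return False`
def stackLoop (rest : List (List Int)) (length width : Int) : Bool :=
  match rest with
  | [] => true
  | b :: t =>
    let nextLength := maxDim b
    let nextWidth := minDim b
    if length > nextLength || width > nextWidth then false
    else stackLoop t nextLength nextWidth

def stackable (boxes : List (List Int)) : Bool :=
  if boxes.length ≤ 1 then true
  else
    match PySem.List.sorted2 boxes maxDim minDim false with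
    | [] => true  -- unreachable: the sorted list has boxes.length ≥ 2 elements
    | b0 :: rest => stackLoop rest (maxDim b0) (minDim b0)

-- ===== PORT B =====
-- B's inner `for j in range(i+1, …)` loop: is dims[i] comparable with every later pair?
def compatAll (d : Int × Int) (rest : List (Int × Int)) : Bool :=
  rest.all (fun e => (d.1 ≤ e.1 && d.2 ≤ e.2) || (e.1 ≤ d.1 && e.2 ≤ d.2))

-- B's outer `for i in range(…)` loop with early `return False`
def pairLoop (dims : List (Int × Int)) : Bool :=
  match dims with
  | [] => true
  | d :: t => compatAll d t && pairLoop t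

def stackable_alt (boxes : List (List Int)) : Bool :=
  if boxes.length ≤ 1 then true
  else pairLoop (boxes.map (fun b => (maxDim b, minDim b)))

-- ===== PRECONDITION & SPEC =====
-- Pre_ excludes exactly the inputs where Python A raises IndexError: more than one box while some
-- box has fewer than two entries (the sort key and the loop index x[0], x[1]).
def Pre_stackable (boxes : List (List Int)) : Prop :=
  boxes.length ≤ 1 ∨ ∀ b ∈ boxes, 2 ≤ b.length
instance (boxes : List (List Int)) : Decidable (Pre_stackable boxes) := by unfold Pre_stackable; infer_instance
def pvWitness_stackable : List (List Int) := [[1, 2], [2, 3]]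

def Spec_stackable (boxes : List (List Int)) (out : Bool) : Prop := out = stackable_alt boxes
instance (boxes : List (List Int)) (out : Bool) : Decidable (Spec_stackable boxes out) := by unfold Spec_stackable; infer_instance

-- ===== CLAIM (what is proved, stated in full; the proofs are below) =====
def Claim_equal_stackable : Prop := ∀ (boxes : List (List Int)), Dom_stackable boxes → Pre_stackable boxes → Spec_stackable boxes (stackable boxes)

-- ===== LEMMAS AND PROOFS =====

-- the strict lexicographic "before" predicate that sorted2 inserts by
def lexBefore (a b : List Int) : Bool :=
  decide (maxDim a < maxDim b) || (!decide (maxDim b < maxDim a) && decide (minDim a < minDim b))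

-- the (total, transitive) non-strict order: b is NOT strictly before a
def lexLe (a b : List Int) : Prop := lexBefore b a = false

-- componentwise comparability of two boxes' oriented dimensions (B's pair test, on boxes)
def compatBox (a b : List Int) : Prop :=
  (maxDim a ≤ maxDim b ∧ minDim a ≤ minDim b) ∨ (maxDim b ≤ maxDim a ∧ minDim b ≤ minDim a)

lemma compatBox_symm : Symmetric compatBox := by
  intro a b h; unfold compatBox at h ⊢; tauto

lemma lexBefore_asym (a b : List Int) (h : lexBefore a b = true) : lexBefore b a = false := by
  simp [lexBefore] at h ⊢; omega

lemma lexLe_trans (a b c : List Int) (h1 : lexLe a b) (h2 : lexLe b c) : lexLe a c := by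
  simp [lexLe, lexBefore] at h1 h2 ⊢; omega

lemma insertBy_lex_pairwise (x : List Int) (ys : List (List Int))
    (h : ys.Pairwise lexLe) : (PySem.List.insertBy lexBefore x ys).Pairwise lexLe := by
  induction ys with
  | nil => simp [PySem.List.insertBy]
  | cons y t ih =>
    rcases List.pairwise_cons.mp h with ⟨hy, ht⟩
    by_cases hb : lexBefore x y = true
    · simp [PySem.List.insertBy, hb]
      refine ⟨⟨lexBefore_asym _ _ hb, fun z hz => ?_⟩, hy, ht⟩
      exact lexLe_trans x y z (lexBefore_asym _ _ hb) (hy z hz)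
    · simp only [PySem.List.insertBy, hb]
      refine List.pairwise_cons.mpr ⟨fun z hz => ?_, ih ht⟩
      rcases (PySem.List.mem_insertBy lexBefore x z t).mp hz with rfl | hzt
      · exact (Bool.not_eq_true _).mp hb
      · exact hy z hzt

lemma foldl_insertBy_lex_pairwise (xs : List (List Int)) :
    ∀ acc : List (List Int), acc.Pairwise lexLe →
      (xs.foldl (fun acc x => PySem.List.insertBy lexBefore x acc) acc).Pairwise lexLe := by
  induction xs with
  | nil => intro acc h; simpa using h
  | cons x t ih => intro acc h; exact ih _ (insertBy_lex_pairwise x acc h)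

lemma sorted2_eq_foldl (boxes : List (List Int)) :
    PySem.List.sorted2 boxes maxDim minDim false
      = boxes.foldl (fun acc x => PySem.List.insertBy lexBefore x acc) [] := rfl

lemma sorted2_lex_pairwise (boxes : List (List Int)) :
    (PySem.List.sorted2 boxes maxDim minDim false).Pairwise lexLe := by
  rw [sorted2_eq_foldl]
  exact foldl_insertBy_lex_pairwise boxes [] (by simp)

-- A's loop, run along a lexLe-chain, is exactly the minor-dimension monotonicity check
lemma stackLoop_eq_chain (bs : List (List Int)) :
    ∀ prev, List.IsChain lexLe (prev :: bs) →
      stackLoop bs (maxDim prev) (minDim prev)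
        = decide (List.IsChain (fun a b : Int => a ≤ b) (minDim prev :: bs.map minDim)) := by
  induction bs with
  | nil => intro prev _; simp [stackLoop]
  | cons b t ih =>
    intro prev hc
    rw [List.isChain_cons] at hc
    obtain ⟨hpb, hbt⟩ := hc
    have hpb' : lexLe prev b := hpb b rfl
    have hmax : ¬ (maxDim prev > maxDim b) := by
      simp [lexLe, lexBefore] at hpb'; omega
    by_cases hw : minDim prev > minDim b
    · simp [stackLoop, hmax, hw, List.isChain_cons]
    · simp only [stackLoop, hmax, hw]
      simp only [decide_false, Bool.or_self, Bool.false_eq_true, if_false]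
      rw [ih b hbt]
      simp [List.isChain_cons]
      omega

-- along a lexLe-sorted list, minor-dimension monotonicity IS pairwise comparability
lemma minChain_iff_pairwise_compat (s : List (List Int)) (hlex : s.Pairwise lexLe) :
    List.IsChain (fun a b : Int => a ≤ b) (s.map minDim) ↔ s.Pairwise compatBox := by
  rw [List.isChain_iff_pairwise, List.pairwise_map]
  constructor
  · intro hmin
    exact (hlex.and hmin).imp (fun {a b} h => by
      obtain ⟨h1, h2⟩ := h
      simp [lexLe, lexBefore] at h1
      unfold compatBox; omega)
  · intro hcomp
    exact (hlex.and hcomp).imp (fun {a b} h => by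
      obtain ⟨h1, h2⟩ := h
      simp [lexLe, lexBefore] at h1
      unfold compatBox at h2; omega)

-- B's nested loops compute pairwise comparability of the dims list
lemma pairLoop_iff_pairwise (dims : List (Int × Int)) :
    pairLoop dims = true
      ↔ dims.Pairwise (fun a b => (a.1 ≤ b.1 ∧ a.2 ≤ b.2) ∨ (b.1 ≤ a.1 ∧ b.2 ≤ a.2)) := by
  induction dims with
  | nil => simp [pairLoop]
  | cons d t ih =>
    simp [pairLoop, ih, compatAll, List.pairwise_cons, List.all_eq_true]

lemma stackable_alt_iff_pairwise (boxes : List (List Int)) (h : ¬ boxes.length ≤ 1) :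
    stackable_alt boxes = true ↔ boxes.Pairwise compatBox := by
  unfold stackable_alt
  rw [if_neg h, pairLoop_iff_pairwise, List.pairwise_map]
  rfl

-- ===== VERDICT (by name: the statement is the Claim_ definition above) =====
theorem stackable_spec : Claim_equal_stackable := by
  intro boxes _ _
  unfold Spec_stackable
  by_cases hlen : boxes.length ≤ 1
  · simp [stackable, stackable_alt, hlen]
  · rw [Bool.eq_iff_iff, stackable_alt_iff_pairwise boxes hlen]
    unfold stackable
    rw [if_neg hlen]
    have hpw := sorted2_lex_pairwise boxes
    have hperm : (PySem.List.sorted2 boxes maxDim minDim false).Perm boxes :=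
      PySem.List.sorted2_perm boxes maxDim minDim false
    cases hbs : PySem.List.sorted2 boxes maxDim minDim false with
    | nil =>
      exfalso
      rw [hbs] at hperm
      have := hperm.length_eq
      simp at this
      omega
    | cons b0 rest =>
      rw [hbs] at hpw hperm
      change stackLoop rest (maxDim b0) (minDim b0) = true ↔ _
      rw [stackLoop_eq_chain rest b0 hpw.isChain]
      have : List.IsChain (fun a b : Int => a ≤ b) (minDim b0 :: rest.map minDim)
          ↔ boxes.Pairwise compatBox := by
        rw [show minDim b0 :: rest.map minDim = (b0 :: rest).map minDim from rfl,
          minChain_iff_pairwise_compat _ hpw]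
        exact ⟨fun h => h.perm hperm (fun hc => compatBox_symm hc),
          fun h => h.perm hperm.symm (fun hc => compatBox_symm hc)⟩
      rw [decide_eq_true_iff, this]
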